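-- pv_equiv track=rewrite | github.com/BudarinPavel/algorithms | yan_algorithm_training_1/l2.py | short_words
-- ===== SOURCE A (Python) =====
-- def short_words(words):
--     min_len = len(words[0])
--     for word in words:
--         if len(word) < min_len:
--             min_len = len(word)
--     ans = []
--     for word in words:
--         if len(word) == min_len:
--             ans.append(word)
--     return ' '.join(ans)
-- ===== SOURCE B (Python) =====
-- def short_words(words):
--     best_len = None
--     ans = []
--     for w in words:
--         l = len(w)
--         if best_len is None or l < best_len:
--             best_len = l
--             ans = [w]
--         elif l == best_len:
--             ans.append(w)
--     return ' '.join(ans)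
-- ===== Notes on version B (the rewrite author's own statement) =====
-- stated objective: alternative
-- what changed: B replaces A's two full passes (one to find the minimum length, one to collect matches) with a single pass that tracks the current minimum and resets the collected list when a shorter word appears.
import Mathlib
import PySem

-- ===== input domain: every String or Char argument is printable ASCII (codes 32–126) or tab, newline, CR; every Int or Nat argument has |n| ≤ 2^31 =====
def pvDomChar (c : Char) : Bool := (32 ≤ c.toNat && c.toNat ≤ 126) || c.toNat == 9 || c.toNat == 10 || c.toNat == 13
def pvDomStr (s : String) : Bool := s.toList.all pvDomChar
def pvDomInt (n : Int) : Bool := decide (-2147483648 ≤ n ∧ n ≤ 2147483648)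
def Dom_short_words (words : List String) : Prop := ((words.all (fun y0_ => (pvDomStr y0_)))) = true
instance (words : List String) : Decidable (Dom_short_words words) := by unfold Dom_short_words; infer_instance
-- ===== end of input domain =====

-- B replaces A's two passes (find min length, then collect) with one pass that resets the
-- collected list whenever a shorter word appears; same O(n) cost, a different algorithm.


-- ===== PORT A =====
def short_words (words : List String) : String :=
  let min_len :=
    words.foldl (fun m w => if PySem.Str.len w < m then PySem.Str.len w else m)
      (PySem.Str.len (PySem.List.pyGetD words 0 ""))
  let ans :=
    words.foldl (fun acc w => if PySem.Str.len w = min_len then acc ++ [w] else acc)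
      ([] : List String)
  PySem.Str.join " " ans

-- ===== PORT B =====
def short_words_alt_step (st : Option Int × List String) (w : String) : Option Int × List String :=
  let l := PySem.Str.len w
  match st.1 with
  | none => (some l, [w])
  | some m =>
    if l < m then (some l, [w])
    else if l = m then (st.1, st.2 ++ [w])
    else st

def short_words_alt (words : List String) : String :=
  let st := words.foldl short_words_alt_step (none, [])
  PySem.Str.join " " st.2

-- ===== PRECONDITION & SPEC =====
-- Pre_ excludes only the empty list, on which A raises IndexError at words[0].
def Pre_short_words (words : List String) : Prop := words ≠ []
instance (words : List String) : Decidable (Pre_short_words words) := by unfold Pre_short_words; infer_instance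
def pvWitness_short_words : List String := ["ab", "c", "de"]

def Spec_short_words (words : List String) (out : String) : Prop := out = short_words_alt words
instance (words : List String) (out : String) : Decidable (Spec_short_words words out) := by unfold Spec_short_words; infer_instance

-- ===== CLAIM (what is proved, stated in full; the proofs are below) =====
def Claim_equal_short_words : Prop := ∀ (words : List String), Dom_short_words words → Pre_short_words words → Spec_short_words words (short_words words)

-- ===== LEMMAS AND PROOFS =====

-- B's loop invariant: from state (some m, collected) where `collected` is exactly the
-- words of the seen prefix p of length m, and m bounds every length in p, the fold yields
-- the running minimum over the rest and the filter of the whole list.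
theorem alt_foldl_inv (ws : List String) :
    ∀ (m : Int) (p : List String), (∀ y ∈ p, m ≤ (y.length : Int)) →
    ws.foldl short_words_alt_step (some m, p.filter (fun y => (y.length : Int) == m)) =
      (some (ws.foldl (fun a w => if (w.length : Int) < a then (w.length : Int) else a) m),
       (p ++ ws).filter (fun y => (y.length : Int) ==
         ws.foldl (fun a w => if (w.length : Int) < a then (w.length : Int) else a) m)) := by
  induction ws with
  | nil => intro m p _; simp
  | cons x ws ih =>
    intro m p hp
    simp only [List.foldl_cons]
    by_cases h1 : (x.length : Int) < m
    · have hstep : short_words_alt_step (some m, p.filter (fun y => (y.length : Int) == m)) x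
          = (some (x.length : Int), [x]) := by
        simp [short_words_alt_step, h1]
      rw [hstep]
      have hfilt : ([x] : List String) =
          (p ++ [x]).filter (fun y => (y.length : Int) == (x.length : Int)) := by
        have hnil : p.filter (fun y => (y.length : Int) == (x.length : Int)) = [] := by
          apply List.filter_eq_nil_iff.mpr
          intro y hy
          have := hp y hy
          simp only [beq_iff_eq]
          intro hc
          omega
        simp [List.filter_append, hnil]
      rw [hfilt]
      rw [ih (x.length : Int) (p ++ [x]) (by
        intro y hy
        rcases List.mem_append.mp hy with h | h
        · have := hp y h; omega
        · simp at h; subst h; omega)]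
      simp [h1, List.append_assoc]
    · by_cases h2 : (x.length : Int) = m
      · have hstep : short_words_alt_step (some m, p.filter (fun y => (y.length : Int) == m)) x
            = (some m, p.filter (fun y => (y.length : Int) == m) ++ [x]) := by
          simp [short_words_alt_step, h2]
        rw [hstep]
        have hfilt : p.filter (fun y => (y.length : Int) == m) ++ [x]
            = (p ++ [x]).filter (fun y => (y.length : Int) == m) := by
          simp [List.filter_append, h2]
        rw [hfilt]
        rw [ih m (p ++ [x]) (by
          intro y hy
          rcases List.mem_append.mp hy with h | h
          · exact hp y h
          · simp at h; subst h; omega)]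
        simp [h2, List.append_assoc]
      · have hstep : short_words_alt_step (some m, p.filter (fun y => (y.length : Int) == m)) x
            = (some m, p.filter (fun y => (y.length : Int) == m)) := by
          simp [short_words_alt_step, h1, h2]
        rw [hstep]
        have hfilt : p.filter (fun y => (y.length : Int) == m)
            = (p ++ [x]).filter (fun y => (y.length : Int) == m) := by
          simp [List.filter_append, h2]
        rw [hfilt]
        rw [ih m (p ++ [x]) (by
          intro y hy
          rcases List.mem_append.mp hy with h | h
          · exact hp y h
          · simp at h; subst h; omega)]
        simp [h1, h2, List.append_assoc]


-- ===== VERDICT (by name: the statement is the Claim_ definition above) =====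
theorem short_words_spec : Claim_equal_short_words := by
  intro words _ hpre
  simp only [Spec_short_words, short_words, short_words_alt]
  obtain ⟨w, ws, rfl⟩ := List.exists_cons_of_ne_nil hpre
  -- normalize PySem.Str.len and the words[0] access
  have hfun : (fun (a : Int) (x : String) => if PySem.Str.len x < a then PySem.Str.len x else a)
      = fun a x => if (x.length : Int) < a then (x.length : Int) else a := by
    funext a x; simp [PySem.Str.len_eq]
  have hget : PySem.Str.len (PySem.List.pyGetD (w :: ws) 0 "") = (w.length : Int) := by
    simp [PySem.List.pyGetD_zero_cons, PySem.Str.len_eq]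
  rw [hfun, hget]
  have hmin : (w :: ws).foldl (fun a x => if (x.length : Int) < a then (x.length : Int) else a)
      (w.length : Int)
      = ws.foldl (fun a x => if (x.length : Int) < a then (x.length : Int) else a) (w.length : Int) := by
    simp [List.foldl_cons]
  rw [hmin]
  set M := ws.foldl (fun a x => if (x.length : Int) < a then (x.length : Int) else a)
    (w.length : Int) with hM
  have hB : (w :: ws).foldl short_words_alt_step (none, ([] : List String)) =
      ws.foldl short_words_alt_step
        (some (w.length : Int), ([w] : List String).filter (fun y => (y.length : Int) == (w.length : Int))) := by
    simp [List.foldl_cons, short_words_alt_step, PySem.Str.len_eq]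
  rw [hB, alt_foldl_inv ws (w.length : Int) [w] (by intro y hy; simp at hy; subst hy; omega)]
  have hansA : (w :: ws).foldl (fun acc x => if PySem.Str.len x = M then acc ++ [x] else acc)
      ([] : List String) = (w :: ws).filter (fun y => (y.length : Int) == M) := by
    have h := PySem.List.foldl_append_ite_eq_filter
      (l := w :: ws) (p := fun y => PySem.Str.len y = M) (acc := ([] : List String))
    rw [h]
    simp only [List.nil_append]
    apply List.filter_congr
    intro y _
    simp [PySem.Str.len_eq, Bool.beq_eq_decide_eq]
  rw [hansA, ← hM]
  simp
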